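-- pv_equiv track=rewrite | github.com/griffintarzan/RolandFP-10-ACR | RolandPiano.py | increment_timestamp
-- ===== SOURCE A (Python) =====
-- def increment_timestamp(b, increment):
--      # Convert bytearray to a list of integers
--     int_list = list(b)
--
--     # Start from the last byte and increment
--     for i in range(len(int_list) - 1, -1, -1):
--         if int_list[i] < 255:
--             int_list[i] += 1
--             break
--         else:
--             int_list[i] = 0
--             if i == 0:
--                 int_list.insert(0, 1)
--
--     return int_list
-- ===== SOURCE B (Python) =====
-- def increment_timestamp(b, increment):
--     # Single carry-fold over the reversed sequence, building a fresh output.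
--     out = []
--     carry = 1
--     for x in reversed(b):
--         if carry and x >= 255:
--             out.append(0)
--         else:
--             out.append(x + carry)
--             carry = 0
--     if carry and b:
--         out.append(1)
--     out.reverse()
--     return out
-- ===== Notes on version B (the rewrite author's own statement) =====
-- stated objective: alternative
-- what changed: A copies the list and mutates it in place, scanning indices from the end with a break and an insert(0,1) on total overflow; B is a single carry-propagating fold over reversed(b) that builds a fresh output list and appends the overflow digit at the end before one final reverse.
import Mathlib
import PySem

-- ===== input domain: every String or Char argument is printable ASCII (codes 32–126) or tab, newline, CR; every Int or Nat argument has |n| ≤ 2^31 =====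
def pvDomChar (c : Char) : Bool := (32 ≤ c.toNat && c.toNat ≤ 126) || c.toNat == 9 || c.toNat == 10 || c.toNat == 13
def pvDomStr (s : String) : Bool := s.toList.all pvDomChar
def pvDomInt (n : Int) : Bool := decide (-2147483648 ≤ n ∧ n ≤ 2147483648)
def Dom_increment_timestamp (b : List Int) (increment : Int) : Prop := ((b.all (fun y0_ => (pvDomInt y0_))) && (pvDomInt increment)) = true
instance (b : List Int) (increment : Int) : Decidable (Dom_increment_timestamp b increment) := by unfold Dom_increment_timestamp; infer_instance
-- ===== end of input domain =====

-- B replaces A's index-mutating scan-with-break by a carry fold over the reversed list (alternative decomposition); return values proved equal on all inputs.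

-- ===== PORT A =====
-- the for-loop over range(len(int_list)-1, -1, -1): the argument is the current index i; 'break' = return, else set to 0 and continue
def incLoopA (l : List Int) : Nat → List Int
  | 0 =>
    match l[0]? with
    | none => l          -- unreachable for the indices the loop visits (totality guard only)
    | some v => if v < 255 then l.set 0 (v + 1) else 1 :: l.set 0 0
  | (i+1) =>
    match l[i+1]? with
    | none => l          -- unreachable (totality guard only)
    | some v => if v < 255 then l.set (i+1) (v + 1) else incLoopA (l.set (i+1) 0) i

def increment_timestamp (b : List Int) (increment : Int) : List Int :=
  incLoopA b (b.length - 1)   -- for b = [] the guard case returns [] like Python's empty range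

-- ===== PORT B =====
-- the body of B's for-loop: state is (out, carry)
def stepB (s : List Int × Int) (x : Int) : List Int × Int :=
  if s.2 ≠ 0 ∧ 255 ≤ x then (s.1 ++ [0], s.2) else (s.1 ++ [x + s.2], 0)

def increment_timestamp_alt (b : List Int) (increment : Int) : List Int :=
  let s := b.reverse.foldl stepB ([], 1)
  let out := if s.2 ≠ 0 ∧ b ≠ [] then s.1 ++ [1] else s.1
  out.reverse

-- ===== PRECONDITION & SPEC =====
def Spec_increment_timestamp (b : List Int) (increment : Int) (out : List Int) : Prop := out = increment_timestamp_alt b increment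
instance (b : List Int) (increment : Int) (out : List Int) : Decidable (Spec_increment_timestamp b increment out) := by unfold Spec_increment_timestamp; infer_instance

-- ===== CLAIM (what is proved, stated in full; the proofs are below) =====
def Claim_equal_increment_timestamp : Prop := ∀ (b : List Int) (increment : Int), Dom_increment_timestamp b increment → Spec_increment_timestamp b increment (increment_timestamp b increment)

-- ===== LEMMAS AND PROOFS =====

-- reference recursion on the reversed list: the (still reversed) incremented digits, and whether the carry survived all of them
def gRef : List Int → List Int × Bool
  | [] => ([], true)
  | x :: xs => if x < 255 then ((x + 1) :: xs, false)
               else (0 :: (gRef xs).1, (gRef xs).2)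

theorem incLoopA_append (l₂ : List Int) : ∀ (i : Nat) (l₁ : List Int), i < l₁.length →
    incLoopA (l₁ ++ l₂) i = incLoopA l₁ i ++ l₂ := by
  intro i
  induction i with
  | zero =>
    intro l₁ h
    match l₁, h with
    | a :: t, _ =>
      simp [incLoopA]
      split <;> simp
  | succ i ih =>
    intro l₁ h
    rw [incLoopA, incLoopA, List.getElem?_append_left h]
    have hs : ∃ v, l₁[i+1]? = some v := ⟨l₁[i+1], List.getElem?_eq_getElem h⟩
    obtain ⟨v, hv⟩ := hs
    rw [hv]
    dsimp only
    split_ifs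
    · exact List.set_append_left _ _ h
    · rw [List.set_append_left _ _ h, ih (l₁.set (i+1) 0) (by rw [List.length_set]; omega)]

theorem incLoopA_char : ∀ (xs : List Int) (x : Int),
    incLoopA ((x :: xs).reverse) (xs.length) =
      (if (gRef (x :: xs)).2 then (gRef (x :: xs)).1 ++ [1] else (gRef (x :: xs)).1).reverse := by
  intro xs
  induction xs with
  | nil =>
    intro x
    simp only [List.reverse_cons, List.reverse_nil, List.nil_append, List.length_nil]
    rw [incLoopA]
    simp only [List.getElem?_cons_zero, gRef]
    split <;> simp
  | cons y ys ih =>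
    intro x
    have hrev : (x :: y :: ys).reverse = (y :: ys).reverse ++ [x] := by simp
    have hlen : ((y :: ys).reverse).length = ys.length + 1 := by simp
    rw [hrev, List.length_cons, incLoopA]
    have hget : ((y :: ys).reverse ++ [x])[ys.length + 1]? = some x := by
      rw [List.getElem?_append_right (by simp)]
      simp
    rw [hget]
    by_cases hx : x < 255
    · simp only [if_pos hx]
      have hset : ((y :: ys).reverse ++ [x]).set (ys.length + 1) (x + 1)
          = (y :: ys).reverse ++ [x + 1] := by
        rw [List.set_append_right _ _ (by simp)]
        simp
      rw [hset, gRef, if_pos hx]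
      simp
    · simp only [if_neg hx]
      have hset : ((y :: ys).reverse ++ [x]).set (ys.length + 1) 0
          = (y :: ys).reverse ++ [0] := by
        rw [List.set_append_right _ _ (by simp)]
        simp
      rw [hset, incLoopA_append [0] ys.length ((y :: ys).reverse) (by simp), ih y]
      have hg : gRef (x :: y :: ys) = (0 :: (gRef (y :: ys)).1, (gRef (y :: ys)).2) := by
        rw [gRef, if_neg hx]
      rw [hg]
      cases hc : (gRef (y :: ys)).2 <;> simp [hc]

theorem foldl_stepB_zero : ∀ (xs : List Int) (acc : List Int),
    List.foldl stepB (acc, 0) xs = (acc ++ xs, 0) := by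
  intro xs
  induction xs with
  | nil => intro acc; simp
  | cons x t ih =>
    intro acc
    have : stepB (acc, 0) x = (acc ++ [x], 0) := by simp [stepB]
    rw [List.foldl_cons, this, ih]
    simp

theorem foldl_stepB_one : ∀ (xs : List Int) (acc : List Int),
    List.foldl stepB (acc, 1) xs = (acc ++ (gRef xs).1, if (gRef xs).2 then 1 else 0) := by
  intro xs
  induction xs with
  | nil => intro acc; simp [gRef]
  | cons x t ih =>
    intro acc
    by_cases hx : x < 255
    · have : stepB (acc, 1) x = (acc ++ [x + 1], 0) := by
        simp [stepB, not_le.mpr hx]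
      rw [List.foldl_cons, this, foldl_stepB_zero, gRef, if_pos hx]
      simp
    · have : stepB (acc, 1) x = (acc ++ [0], 1) := by
        simp [stepB, not_lt.mp hx]
      rw [List.foldl_cons, this, ih, gRef, if_neg hx]
      simp

-- ===== VERDICT (by name: the statement is the Claim_ definition above) =====
theorem increment_timestamp_spec : Claim_equal_increment_timestamp := by
  intro b increment _
  show increment_timestamp b increment = increment_timestamp_alt b increment
  rcases hr : b.reverse with _ | ⟨x, xs⟩
  · have hb : b = [] := by simpa using congrArg List.reverse hr
    subst hb
    simp [increment_timestamp, increment_timestamp_alt, incLoopA]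
  · have hb : b = (x :: xs).reverse := by
      rw [← List.reverse_reverse b, hr]
    subst hb
    unfold increment_timestamp increment_timestamp_alt
    rw [List.reverse_reverse, foldl_stepB_one]
    have hlen : ((x :: xs).reverse).length - 1 = xs.length := by simp
    rw [hlen, incLoopA_char]
    have hne : (x :: xs).reverse ≠ [] := by simp
    cases hc : (gRef (x :: xs)).2 <;> simp
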